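-- pv_equiv track=rewrite | github.com/Bereket234/competitive-programming | compare_tshirt/compare_tshirt.py | compare_sizes
-- ===== SOURCE A (Python) =====
-- def compare_sizes(sizes):
--       res= ''
--       s= [0, 0]
--       for i, size in enumerate(sizes):
--             if size[-1]== 'M':
--                   s[i]= 60
--             if size[-1]== 'S':
--                   s[i] = 50
--                   for j in range(len(size)-1):
--                         s[i]-=1
--             if size[-1] == 'L':
--                   s[i]= 70
--                   for j in range(len(size)-1):
--                         s[i]+=1
--
--       if s[0] > s[1]:
--             return '>'
--       if s[0]< s[1]:
--             return '<'
--       if s[0]== s[1]: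
--             return '='
-- ===== SOURCE B (Python) =====
-- def compare_sizes(sizes):
--     def score(sz):
--         d = {'S': -1, 'M': 0, 'L': 1}.get(sz[-1])
--         return 0 if d is None else 60 + d * (9 + len(sz))
--     s0 = score(sizes[0]) if len(sizes) > 0 else 0
--     s1 = score(sizes[1]) if len(sizes) > 1 else 0
--     return '=><'[(s0 > s1) - (s0 < s1)]
-- ===== Notes on version B (the rewrite author's own statement) =====
-- stated objective: simpler
-- what changed: Replaces A's mutable two-slot array, enumerate loop and per-character inner counting loops with a delta lookup table {'S':-1,'M':0,'L':1} feeding a single unified formula 60+d*(9+len), scores only the first two sizes directly, and selects the answer by indexing '=><' with the comparison's sign instead of an if-chain of returns.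
import Mathlib
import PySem

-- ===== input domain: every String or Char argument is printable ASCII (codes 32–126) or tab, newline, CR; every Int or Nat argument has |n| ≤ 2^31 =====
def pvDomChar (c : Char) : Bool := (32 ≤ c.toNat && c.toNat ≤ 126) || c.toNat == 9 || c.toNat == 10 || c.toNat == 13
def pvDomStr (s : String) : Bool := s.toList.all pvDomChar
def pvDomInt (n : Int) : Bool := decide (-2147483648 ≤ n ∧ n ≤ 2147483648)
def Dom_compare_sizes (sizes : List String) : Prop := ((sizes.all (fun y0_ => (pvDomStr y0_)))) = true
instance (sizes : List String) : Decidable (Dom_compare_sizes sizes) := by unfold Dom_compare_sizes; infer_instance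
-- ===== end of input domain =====

-- B drops A's mutable two-slot array, enumerate loop and per-character inner loops:
-- one delta table + one arithmetic formula per size, and the answer is picked from
-- '=><' by the comparison's sign; objective: simpler.

-- ===== PORT A =====
-- one step of A's 'for i, size in enumerate(sizes)' loop, state = the list s
def compare_sizes_step (s : List Int) (p : Int × String) : List Int :=
  let i := p.1.toNat   -- i is 0 or 1 inside Pre_; A's s[i]= raises for i ≥ 2 (excluded by Pre_)
  let size := p.2
  let s := if PySem.Str.pyGet? size (-1) = some 'M' then s.set i 60 else s
  let s := if PySem.Str.pyGet? size (-1) = some 'S' then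
      s.set i ((PySem.List.pyRange 0 ((size.toList.length : Int) - 1) 1).foldl
                 (fun acc _ => acc - 1) 50)
    else s
  let s := if PySem.Str.pyGet? size (-1) = some 'L' then
      s.set i ((PySem.List.pyRange 0 ((size.toList.length : Int) - 1) 1).foldl
                 (fun acc _ => acc + 1) 70)
    else s
  s

def compare_sizes (sizes : List String) : String :=
  let s := (PySem.List.enumerate sizes 0).foldl compare_sizes_step [0, 0]
  if s.getD 0 0 > s.getD 1 0 then ">"
  else if s.getD 0 0 < s.getD 1 0 then "<"
  else "="

-- ===== PORT B =====
-- {'S': -1, 'M': 0, 'L': 1}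
def compare_sizes_delta : PySem.Dict Char Int :=
  PySem.Dict.ofList [('S', -1), ('M', 0), ('L', 1)]

-- d = table.get(sz[-1]);  0 if d is None else 60 + d * (9 + len(sz))
def compare_sizes_altScore (sz : String) : Int :=
  match (PySem.Str.pyGet? sz (-1)).bind (fun c => compare_sizes_delta.get? c) with
  | none => 0
  | some d => 60 + d * (9 + (sz.toList.length : Int))

def compare_sizes_alt (sizes : List String) : String :=
  let s0 := match sizes with | x :: _ => compare_sizes_altScore x | [] => 0
  let s1 := match sizes with | _ :: y :: _ => compare_sizes_altScore y | _ => 0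
  -- '=><'[(s0 > s1) - (s0 < s1)]  (index 1 → '>', -1 → '<', 0 → '=')
  match PySem.Str.pyGet? "=><"
      ((if s0 > s1 then (1 : Int) else 0) - (if s0 < s1 then 1 else 0)) with
  | some c => String.ofList [c]
  | none => ""   -- unreachable: the index is always -1, 0 or 1

-- ===== PRECONDITION & SPEC =====
-- A raises IndexError when some size is the empty string (size[-1]) or when a
-- third-or-later size ends in 'M'/'S'/'L' (the write s[i]= with i ≥ 2); both are
-- excluded (later sizes NOT ending in M/S/L never write s and are harmless).
def Pre_compare_sizes (sizes : List String) : Prop :=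
  (∀ x ∈ sizes, x ≠ "") ∧
  ∀ x ∈ sizes.drop 2, x.toList.getLast? ≠ some 'M' ∧
    x.toList.getLast? ≠ some 'S' ∧ x.toList.getLast? ≠ some 'L'
instance (sizes : List String) : Decidable (Pre_compare_sizes sizes) := by
  unfold Pre_compare_sizes; infer_instance

def pvWitness_compare_sizes : List String := ["XXL", "M", "X"]

def Spec_compare_sizes (sizes : List String) (out : String) : Prop := out = compare_sizes_alt sizes
instance (sizes : List String) (out : String) : Decidable (Spec_compare_sizes sizes out) := by unfold Spec_compare_sizes; infer_instance

-- ===== CLAIM (what is proved, stated in full; the proofs are below) =====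
def Claim_equal_compare_sizes : Prop := ∀ (sizes : List String), Dom_compare_sizes sizes → Pre_compare_sizes sizes → Spec_compare_sizes sizes (compare_sizes sizes)


-- ===== LEMMAS AND PROOFS =====

theorem foldl_sub_one (l : List Int) (a : Int) :
    l.foldl (fun acc _ => acc - 1) a = a - l.length := by
  induction l generalizing a with
  | nil => simp
  | cons x xs ih => simp [List.foldl, ih]; ring

theorem foldl_add_one (l : List Int) (a : Int) :
    l.foldl (fun acc _ => acc + 1) a = a + l.length := by
  induction l generalizing a with
  | nil => simp
  | cons x xs ih => simp [List.foldl, ih]; ring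

-- a list is unchanged by writing the value it already holds
theorem set_same (s : List Int) (n : Nat) (h : s[n]? = some 0) : s = s.set n 0 := by
  apply List.ext_getElem?
  intro m
  rw [List.getElem?_set]
  split_ifs with h1 h2
  · subst h1; simp_all
  · subst h1
    rw [List.getElem?_eq_none (by omega)] at h
    exact absurd h (by simp)
  · rfl

-- a size that does not end in 'M'/'S'/'L' leaves A's state untouched
theorem step_id (s : List Int) (i : Int) (size : String) (h : size ≠ "")
    (hM : size.toList.getLast? ≠ some 'M') (hS : size.toList.getLast? ≠ some 'S')
    (hL : size.toList.getLast? ≠ some 'L') :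
    compare_sizes_step s (i, size) = s := by
  have hne : size.toList ≠ [] := fun hc => h (by
    have := congrArg String.ofList hc; simpa using this)
  have hget : PySem.List.pyGet? size.toList (-1) = some (size.toList.getLast hne) := by
    rw [PySem.List.pyGet?_neg_one, List.getLast?_eq_some_getLast]
  rw [List.getLast?_eq_some_getLast (h := hne)] at hM hS hL
  have hM' : size.toList.getLast hne ≠ 'M' := by simpa using hM
  have hS' : size.toList.getLast hne ≠ 'S' := by simpa using hS
  have hL' : size.toList.getLast hne ≠ 'L' := by simpa using hL
  unfold compare_sizes_step
  simp [PySem.Str.pyGet?, hget, hM', hS', hL']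

-- folding A's step over sizes beyond the second changes nothing
theorem fold_id (rest : List String) (k : Int) (s : List Int)
    (h : ∀ x ∈ rest, x ≠ "" ∧ x.toList.getLast? ≠ some 'M' ∧
      x.toList.getLast? ≠ some 'S' ∧ x.toList.getLast? ≠ some 'L') :
    (PySem.List.enumerate rest k).foldl compare_sizes_step s = s := by
  induction rest generalizing k with
  | nil => simp [PySem.List.enumerate_nil]
  | cons z zs ih =>
      obtain ⟨hz, hM, hS, hL⟩ := h z (by simp)
      rw [PySem.List.enumerate_cons, List.foldl_cons, step_id s k z hz hM hS hL]
      exact ih (k + 1) (fun x hx => h x (by simp [hx]))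

-- A's assigned value for a nonempty size equals B's table-driven score
theorem step_value (size : String) (h : size ≠ "") (s : List Int) (i : Int)
    (h0 : s[i.toNat]? = some 0) :
    compare_sizes_step s (i, size) = s.set i.toNat (compare_sizes_altScore size) := by
  have hne : size.toList ≠ [] := fun hc => h (by
    have := congrArg String.ofList hc; simpa using this)
  have hget : PySem.List.pyGet? size.toList (-1) = some (size.toList.getLast hne) := by
    rw [PySem.List.pyGet?_neg_one, List.getLast?_eq_some_getLast]
  have hlen : 1 ≤ size.toList.length := List.length_pos_iff.mpr hne
  have hlen2 : size.length = size.toList.length := rfl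
  have hmk : compare_sizes_delta = PySem.Dict.mk [('S', -1), ('M', 0), ('L', 1)] := by rfl
  set c := size.toList.getLast hne with hc
  unfold compare_sizes_step compare_sizes_altScore
  rw [hmk]
  by_cases hM : c = 'M'
  · simp [PySem.Str.pyGet?, hget, hM, PySem.Dict.get?_mk_cons]
  · by_cases hS : c = 'S'
    · simp [PySem.Str.pyGet?, hget, hS, PySem.Dict.get?_mk_cons, foldl_sub_one,
            PySem.List.length_pyRange_one]
      congr 1
      rw [hlen2]
      omega
    · by_cases hL : c = 'L'
      · simp [PySem.Str.pyGet?, hget, hL, PySem.Dict.get?_mk_cons, foldl_add_one,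
              PySem.List.length_pyRange_one]
        congr 1
        rw [hlen2]
        omega
      · have hM' : ¬ ('M' = c) := fun hh => hM hh.symm
        have hS' : ¬ ('S' = c) := fun hh => hS hh.symm
        have hL' : ¬ ('L' = c) := fun hh => hL hh.symm
        simp [PySem.Str.pyGet?, hget, hM, hS, hL, hM', hS', hL', PySem.Dict.get?]
        exact set_same s i.toNat h0

-- A's if-chain on two scores = B's sign-index into '=><'
theorem cmp_sign (a b : Int) :
    (if a > b then ">" else if a < b then "<" else ("=" : String)) =
    (match PySem.Str.pyGet? "=><"
        ((if a > b then (1 : Int) else 0) - (if a < b then 1 else 0)) with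
     | some c => String.ofList [c]
     | none => "") := by
  rcases lt_trichotomy a b with h | h | h
  · simp only [h, not_lt_of_gt h, if_true, if_false]
    decide
  · subst h
    simp only [gt_iff_lt, lt_irrefl, if_false]
    decide
  · simp only [gt_iff_lt, h, not_lt_of_gt h, if_true, if_false]
    decide

-- ===== VERDICT (by name: the statement is the Claim_ definition above) =====
theorem compare_sizes_spec : Claim_equal_compare_sizes := by
  intro sizes _ hpre
  obtain ⟨hne, htail⟩ := hpre
  unfold Spec_compare_sizes compare_sizes compare_sizes_alt
  match sizes with
  | [] =>
      decide
  | [x] =>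
      have hx : x ≠ "" := hne x (by simp)
      simp only [PySem.List.enumerate_cons, PySem.List.enumerate_nil, List.foldl]
      simp only [step_value x hx [0, 0] 0 (by decide)]
      simpa using cmp_sign (compare_sizes_altScore x) 0
  | x :: y :: rest =>
      have hx : x ≠ "" := hne x (by simp)
      have hy : y ≠ "" := hne y (by simp)
      simp only [PySem.List.enumerate_cons, List.foldl_cons]
      simp only [step_value x hx [0, 0] 0 (by decide), Int.toNat_zero, List.set]
      simp only [step_value y hy [compare_sizes_altScore x, 0] (0 + 1) (by simp)]
      rw [show ([compare_sizes_altScore x, 0] : List Int).set ((0 : Int) + 1).toNat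
            (compare_sizes_altScore y) = [compare_sizes_altScore x, compare_sizes_altScore y]
          from by norm_num]
      rw [fold_id rest (0 + 1 + 1) _ (fun x hx => ⟨hne x (by simp [hx]), by simpa using htail x hx⟩)]
      simpa using cmp_sign (compare_sizes_altScore x) (compare_sizes_altScore y)
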